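-- pv_equiv track=rewrite | github.com/futuredialchallenge/2024-RAG | reader.py | split_turn_batch
-- ===== SOURCE A (Python) =====
-- def split_turn_batch(turn_batch, batch_size, other_batch=None):
--     batches=[]
--     other_batches=[]
--     B=len(turn_batch['user'])
--     for i in range(0, B, batch_size):
--         new_turn_batch={}
--         if other_batch:
--             other_batches.append(other_batch[i:i+batch_size])
--         for key in turn_batch:
--             new_turn_batch[key]=turn_batch[key][i:i+batch_size]
--         batches.append(new_turn_batch)
--     if other_batch:
--         return batches, other_batches
--     else:
--         return batches, None
-- ===== SOURCE B (Python) =====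
-- def split_turn_batch(turn_batch, batch_size, other_batch=None):
--     B = len(turn_batch['user'])
--     starts = list(range(0, B, batch_size))
--     chunked = {key: [turn_batch[key][s:s + batch_size] for s in starts]
--                for key in turn_batch}
--     batches = [{key: chunked[key][b] for key in turn_batch}
--                for b in range(len(starts))]
--     if other_batch:
--         return batches, [other_batch[s:s + batch_size] for s in starts]
--     return batches, None
-- ===== Notes on version B (the rewrite author's own statement) =====
-- stated objective: alternative
-- what changed: A builds each sub-batch dict inside a single window loop (window-major); B first chunks every field (and other_batch) over the window starts into an intermediate per-field dict of slice lists, then transposes by window index to assemble the sub-batches.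
-- outside the precondition, e.g. on split_turn_batch({'sys': ['a']}, 2, None): A raises KeyError, B raises KeyError; on split_turn_batch({'user': ['a', 'b']}, 0, None): A raises ValueError, B raises ValueError
import Mathlib
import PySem

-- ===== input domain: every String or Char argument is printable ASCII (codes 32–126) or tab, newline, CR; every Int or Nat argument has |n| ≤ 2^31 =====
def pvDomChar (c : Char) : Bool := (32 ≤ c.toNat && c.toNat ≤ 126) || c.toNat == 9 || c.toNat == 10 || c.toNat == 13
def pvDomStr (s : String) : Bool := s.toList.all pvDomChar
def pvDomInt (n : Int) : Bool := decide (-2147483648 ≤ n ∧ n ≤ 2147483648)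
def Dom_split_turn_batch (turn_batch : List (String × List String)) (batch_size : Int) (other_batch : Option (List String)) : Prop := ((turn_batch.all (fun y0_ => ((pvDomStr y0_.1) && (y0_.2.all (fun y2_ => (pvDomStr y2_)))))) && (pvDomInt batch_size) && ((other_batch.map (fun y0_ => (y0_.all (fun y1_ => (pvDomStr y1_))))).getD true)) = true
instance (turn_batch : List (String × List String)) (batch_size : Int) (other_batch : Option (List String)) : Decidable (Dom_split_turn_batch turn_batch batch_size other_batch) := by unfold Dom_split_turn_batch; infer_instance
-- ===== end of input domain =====

-- B replaces A's window-major loop (build each sub-dict inside the window loop) by a field-major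
-- chunk-then-transpose decomposition (chunk every field and other_batch over the window starts once,
-- then assemble each sub-batch by indexing the chunks); objective: alternative, same cost.


-- ===== PORT A =====
-- 'if other_batch:' — a truthy Optional[list]: present and non-empty
def pvTruthy (ob : Option (List String)) : Bool :=
  match ob with
  | none => false
  | some l => !l.isEmpty

def split_turn_batch (turn_batch : List (String × List String)) (batch_size : Int) (other_batch : Option (List String)) : (List (List (String × List String))) × Option (List (List String)) :=
  match (PySem.Dict.mk turn_batch).get? "user" with
  | none => ([], none)   -- KeyError in Python; excluded by Pre_
  | some user =>
    let res := (PySem.List.pyRange 0 (user.length : Int) batch_size).foldl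
      (fun (acc : List (List (String × List String)) × List (List String)) i =>
        let others := if pvTruthy other_batch then
            acc.2 ++ [PySem.List.slice (other_batch.getD []) (some i) (some (i + batch_size))]
          else acc.2
        let newd := turn_batch.foldl
          (fun (nd : PySem.Dict String (List String)) kv =>
            nd.insert kv.1 (PySem.List.slice ((PySem.Dict.mk turn_batch).getD kv.1 []) (some i) (some (i + batch_size))))
          PySem.Dict.empty
        (acc.1 ++ [newd.items], others))
      ([], [])
    if pvTruthy other_batch then (res.1, some res.2) else (res.1, none)

-- ===== PORT B =====
def split_turn_batch_alt (turn_batch : List (String × List String)) (batch_size : Int) (other_batch : Option (List String)) : (List (List (String × List String))) × Option (List (List String)) :=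
  match (PySem.Dict.mk turn_batch).get? "user" with
  | none => ([], none)   -- KeyError in Python; excluded by Pre_
  | some user =>
    let starts := PySem.List.pyRange 0 (user.length : Int) batch_size
    let chunked := turn_batch.foldl
      (fun (d : PySem.Dict String (List (List String))) kv =>
        d.insert kv.1 (starts.map (fun s => PySem.List.slice ((PySem.Dict.mk turn_batch).getD kv.1 []) (some s) (some (s + batch_size)))))
      PySem.Dict.empty
    let batches := (PySem.List.pyRange 0 (starts.length : Int) 1).map
      (fun b =>
        (turn_batch.foldl
          (fun (nd : PySem.Dict String (List String)) kv =>
            nd.insert kv.1 (PySem.List.pyGetD (chunked.getD kv.1 []) b []))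
          PySem.Dict.empty).items)
    if pvTruthy other_batch then
      (batches, some (starts.map (fun s => PySem.List.slice (other_batch.getD []) (some s) (some (s + batch_size)))))
    else (batches, none)

-- ===== PRECONDITION & SPEC =====
-- Pre_ excludes exactly the inputs where Python A raises: a missing 'user' key (KeyError)
-- and batch_size = 0 (ValueError from range's zero step).
def Pre_split_turn_batch (turn_batch : List (String × List String)) (batch_size : Int) (other_batch : Option (List String)) : Prop :=
  "user" ∈ turn_batch.map (·.1) ∧ batch_size ≠ 0
instance (turn_batch : List (String × List String)) (batch_size : Int) (other_batch : Option (List String)) : Decidable (Pre_split_turn_batch turn_batch batch_size other_batch) := by unfold Pre_split_turn_batch; infer_instance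
def pvWitness_split_turn_batch : (List (String × List String)) × Int × Option (List String) :=
  ([("user", ["a", "b", "c"]), ("sys", ["s1", "s2", "s3"])], 2, some ["x", "y", "z"])

def Spec_split_turn_batch (turn_batch : List (String × List String)) (batch_size : Int) (other_batch : Option (List String)) (out : (List (List (String × List String))) × Option (List (List String))) : Prop := out = split_turn_batch_alt turn_batch batch_size other_batch
instance (turn_batch : List (String × List String)) (batch_size : Int) (other_batch : Option (List String)) (out : (List (List (String × List String))) × Option (List (List String))) : Decidable (Spec_split_turn_batch turn_batch batch_size other_batch out) := by unfold Spec_split_turn_batch; infer_instance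

-- ===== CLAIM (what is proved, stated in full; the proofs are below) =====
def Claim_equal_split_turn_batch : Prop := ∀ (turn_batch : List (String × List String)) (batch_size : Int) (other_batch : Option (List String)), Dom_split_turn_batch turn_batch batch_size other_batch → Pre_split_turn_batch turn_batch batch_size other_batch → Spec_split_turn_batch turn_batch batch_size other_batch (split_turn_batch turn_batch batch_size other_batch)

-- ===== LEMMAS AND PROOFS =====

-- A fold inserting, for each pair of l, a value that depends only on the key:
-- lookup afterwards gives that value for any key occurring in l.
theorem getD_foldl_insert_keyfun {ν : Type} (l : List (String × List String)) (f : String → ν)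
    (d : PySem.Dict String ν) (k : String) (dflt : ν) :
    (l.foldl (fun d kv => d.insert kv.1 (f kv.1)) d).getD k dflt
      = if k ∈ l.map (·.1) then f k else d.getD k dflt := by
  induction l generalizing d with
  | nil => simp
  | cons a t ih =>
    simp only [List.foldl_cons, ih, List.map_cons, List.mem_cons]
    by_cases hm : k ∈ t.map (·.1) <;>
      rcases eq_or_ne k a.1 with h | h <;>
      simp [hm, h, PySem.Dict.getD_insert]

-- the b-th sub-dict assembled by indexing the chunked fields equals A's sub-dict for window start starts[k]
theorem inner_dict_eq (tb : List (String × List String)) (bs : Int) (starts : List Int)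
    (k : Nat) (hk : k < starts.length) :
    tb.foldl (fun (nd : PySem.Dict String (List String)) kv =>
        nd.insert kv.1 (PySem.List.pyGetD
          ((tb.foldl (fun (d : PySem.Dict String (List (List String))) kv =>
              d.insert kv.1 (starts.map (fun s =>
                PySem.List.slice ((PySem.Dict.mk tb).getD kv.1 []) (some s) (some (s + bs)))))
            PySem.Dict.empty).getD kv.1 []) (k : Int) []))
      PySem.Dict.empty
    = tb.foldl (fun (nd : PySem.Dict String (List String)) kv =>
        nd.insert kv.1 (PySem.List.slice ((PySem.Dict.mk tb).getD kv.1 [])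
          (some starts[k]) (some (starts[k] + bs))))
      PySem.Dict.empty := by
  apply PySem.List.foldl_congr_mem
  intro acc kv hkv
  congr 1
  rw [getD_foldl_insert_keyfun
        (f := fun key => starts.map (fun s =>
          PySem.List.slice ((PySem.Dict.mk tb).getD key []) (some s) (some (s + bs)))),
      if_pos (List.mem_map_of_mem hkv),
      PySem.List.pyGetD_natCast,
      List.getD_eq_getElem _ _ (by simpa using hk)]
  simp

theorem split_turn_batch_spec : Claim_equal_split_turn_batch := by
  intro turn_batch batch_size other_batch _ _
  unfold Spec_split_turn_batch split_turn_batch split_turn_batch_alt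
  cases hu : (PySem.Dict.mk turn_batch).get? "user" with
  | none => rfl
  | some user =>
    simp only []
    rw [PySem.List.foldl_prod_mk
      (f := fun (acc : List (List (String × List String))) i =>
        acc ++ [(turn_batch.foldl
          (fun (nd : PySem.Dict String (List String)) kv =>
            nd.insert kv.1 (PySem.List.slice ((PySem.Dict.mk turn_batch).getD kv.1 []) (some i) (some (i + batch_size))))
          PySem.Dict.empty).items])
      (g := fun (acc : List (List String)) i =>
        if pvTruthy other_batch then
          acc ++ [PySem.List.slice (other_batch.getD []) (some i) (some (i + batch_size))]
        else acc)]
    rw [PySem.List.foldl_append_singleton_eq_map]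
    -- batches: index-major map equals window-major map
    have hb : (PySem.List.pyRange 0 (((PySem.List.pyRange 0 (user.length : Int) batch_size).length : Int)) 1).map
        (fun b =>
          (turn_batch.foldl
            (fun (nd : PySem.Dict String (List String)) kv =>
              nd.insert kv.1 (PySem.List.pyGetD
                ((turn_batch.foldl (fun (d : PySem.Dict String (List (List String))) kv =>
                    d.insert kv.1 ((PySem.List.pyRange 0 (user.length : Int) batch_size).map (fun s =>
                      PySem.List.slice ((PySem.Dict.mk turn_batch).getD kv.1 []) (some s) (some (s + batch_size)))))
                  PySem.Dict.empty).getD kv.1 []) b []))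
            PySem.Dict.empty).items)
      = (PySem.List.pyRange 0 (user.length : Int) batch_size).map
        (fun i =>
          (turn_batch.foldl
            (fun (nd : PySem.Dict String (List String)) kv =>
              nd.insert kv.1 (PySem.List.slice ((PySem.Dict.mk turn_batch).getD kv.1 []) (some i) (some (i + batch_size))))
            PySem.Dict.empty).items) := by
      set starts := PySem.List.pyRange 0 (user.length : Int) batch_size with hs
      rw [PySem.List.pyRange_zero_nat starts.length, List.map_map]
      apply List.ext_getElem (by simp)
      intro k h1 h2
      have hk : k < starts.length := by simpa using h1
      simp only [List.getElem_map, List.getElem_range, Function.comp_apply]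
      rw [inner_dict_eq turn_batch batch_size starts k hk]
    by_cases ht : pvTruthy other_batch
    · simp only [ht, if_true]
      rw [PySem.List.foldl_append_singleton_eq_map]
      simp only [List.nil_append]
      exact Prod.ext (by rw [hb]) rfl
    · simp only [ht, if_false, Bool.false_eq_true]
      simp only [List.nil_append]
      exact Prod.ext (by rw [hb]) rfl
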